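-- pv_equiv track=rewrite | github.com/zslrmhb/FluidLearn | src/core/representations/grid.py | reindexing_spatial_shift
-- ===== SOURCE A (Python) =====
-- def reindexing_spatial_shift(grid: list[list[int]], axis: int = 0, shift: int = 1) -> list[list[int]]:
--     """Cyclic shift along rows (axis=0) or cols (axis=1)."""
--     if not grid or not grid[0]:
--         return grid
--     if axis == 0:
--         k = shift % len(grid)
--         return grid[-k:] + grid[:-k] if k else [list(row) for row in grid]
--     if axis == 1:
--         cols = len(grid[0])
--         k = shift % cols
--         return [row[-k:] + row[:-k] if k else list(row) for row in grid]
--     raise ValueError("Axis must be 0 or 1.")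
-- ===== SOURCE B (Python) =====
-- def reindexing_spatial_shift(grid: list[list[int]], axis: int = 0, shift: int = 1) -> list[list[int]]:
--     """Cyclic shift along rows (axis=0) or cols (axis=1), by modular source indexing."""
--     if not grid or not grid[0]:
--         return grid
--     if axis == 0:
--         n = len(grid)
--         s = shift % n
--         return [grid[(i - s) % n] for i in range(n)]
--     if axis == 1:
--         cols = len(grid[0])
--         s = shift % cols
--         return [[row[(j - s) % cols] for j in range(cols)] for row in grid]
--     raise ValueError("Axis must be 0 or 1.")
-- ===== Notes on version B (the rewrite author's own statement) =====
-- stated objective: alternative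
-- what changed: Each output slot is filled from a modular source index (grid[(i-shift%n)%n] / row[(j-s)%cols]) instead of splitting the sequence into two negative-index slices and concatenating them.
-- outside the precondition, e.g. on reindexing_spatial_shift([[1, 2, 3], [4, 5]], 1, 1): A returns [[3, 1, 2], [5, 4]], B raises IndexError
import Mathlib
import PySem

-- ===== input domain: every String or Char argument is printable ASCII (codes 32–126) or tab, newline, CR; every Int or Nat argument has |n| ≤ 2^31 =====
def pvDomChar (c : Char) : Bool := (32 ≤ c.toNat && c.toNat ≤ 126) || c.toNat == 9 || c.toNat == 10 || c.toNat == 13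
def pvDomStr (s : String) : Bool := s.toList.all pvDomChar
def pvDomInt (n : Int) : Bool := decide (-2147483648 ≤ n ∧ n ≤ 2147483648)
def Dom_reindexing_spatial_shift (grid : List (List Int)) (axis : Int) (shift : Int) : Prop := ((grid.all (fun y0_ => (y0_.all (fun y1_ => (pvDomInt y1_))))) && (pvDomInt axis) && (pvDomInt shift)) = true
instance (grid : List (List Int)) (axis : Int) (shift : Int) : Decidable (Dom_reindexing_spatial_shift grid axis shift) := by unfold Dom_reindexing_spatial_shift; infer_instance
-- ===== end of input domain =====

-- B fills each output slot from a modular source index instead of concatenating two slices;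
-- same cost, different decomposition (aliasing of the returned row objects differs, invisible to value equivalence).

-- ===== PORT A =====
def reindexing_spatial_shift (grid : List (List Int)) (axis : Int) (shift : Int) : List (List Int) :=
  if grid = [] ∨ grid.headD [] = [] then grid
  else if axis = 0 then
    let k := PySem.Int.mod shift (grid.length : Int)
    if k ≠ 0 then
      PySem.List.slice grid (some (-k)) none ++ PySem.List.slice grid none (some (-k))
    else grid.map (fun row => row)
  else if axis = 1 then
    let cols : Int := ((grid.headD []).length : Int)
    let k := PySem.Int.mod shift cols
    grid.map (fun row =>
      if k ≠ 0 then PySem.List.slice row (some (-k)) none ++ PySem.List.slice row none (some (-k))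
      else row)
  else []  -- raise ValueError: excluded by Pre_

-- ===== PORT B =====
def reindexing_spatial_shift_alt (grid : List (List Int)) (axis : Int) (shift : Int) : List (List Int) :=
  if grid = [] ∨ grid.headD [] = [] then grid
  else if axis = 0 then
    let n : Int := (grid.length : Int)
    let s := PySem.Int.mod shift n
    (PySem.List.pyRange 0 n 1).map (fun i => PySem.List.pyGetD grid (PySem.Int.mod (i - s) n) [])
  else if axis = 1 then
    let cols : Int := ((grid.headD []).length : Int)
    let s := PySem.Int.mod shift cols
    grid.map (fun row =>
      (PySem.List.pyRange 0 cols 1).map (fun j => PySem.List.pyGetD row (PySem.Int.mod (j - s) cols) 0))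
  else []  -- raise ValueError: excluded by Pre_

-- ===== PRECONDITION & SPEC =====
-- Pre_ excludes axis outside {0,1} on nonempty grids (A raises ValueError), and ragged grids for
-- axis = 1, where A's per-row value (cols taken from the first row only) is an accident of slicing
-- and B raises IndexError.
def Pre_reindexing_spatial_shift (grid : List (List Int)) (axis : Int) (shift : Int) : Prop :=
  grid = [] ∨ grid.headD [] = [] ∨
    ((axis = 0 ∨ axis = 1) ∧
      (axis = 1 → ∀ row ∈ grid, row.length = (grid.headD []).length))
instance (grid : List (List Int)) (axis : Int) (shift : Int) : Decidable (Pre_reindexing_spatial_shift grid axis shift) := by unfold Pre_reindexing_spatial_shift; infer_instance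

def pvWitness_reindexing_spatial_shift : List (List Int) × Int × Int := ([[1, 2], [3, 4], [5, 6]], 0, 1)

def Spec_reindexing_spatial_shift (grid : List (List Int)) (axis : Int) (shift : Int) (out : List (List Int)) : Prop := out = reindexing_spatial_shift_alt grid axis shift
instance (grid : List (List Int)) (axis : Int) (shift : Int) (out : List (List Int)) : Decidable (Spec_reindexing_spatial_shift grid axis shift out) := by unfold Spec_reindexing_spatial_shift; infer_instance

-- ===== CLAIM (what is proved, stated in full; the proofs are below) =====
def Claim_equal_reindexing_spatial_shift : Prop := ∀ (grid : List (List Int)) (axis : Int) (shift : Int), Dom_reindexing_spatial_shift grid axis shift → Pre_reindexing_spatial_shift grid axis shift → Spec_reindexing_spatial_shift grid axis shift (reindexing_spatial_shift grid axis shift)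

-- ===== LEMMAS AND PROOFS =====

-- modular-index comprehension = rotation by s (last s elements first); covers s = 0 too
lemma rot_mod_eq {α : Type} (xs : List α) (d : α) (s : Int)
    (h0 : 0 ≤ s) (h1 : s < (xs.length : Int)) :
    (PySem.List.pyRange 0 (xs.length : Int) 1).map
        (fun i => PySem.List.pyGetD xs (PySem.Int.mod (i - s) (xs.length : Int)) d)
    = xs.drop (xs.length - s.toNat) ++ xs.take (xs.length - s.toNat) := by
  have hn : 0 < (xs.length : Int) := lt_of_le_of_lt h0 h1
  apply List.ext_getElem
  · simp [PySem.List.length_pyRange_one]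
  · intro j hj1 hj2
    have hj : j < xs.length := by
      simpa [PySem.List.length_pyRange_one] using hj1
    rw [List.getElem_map, PySem.List.getElem_pyRange_one _ _ _ (by simpa [PySem.List.length_pyRange_one] using hj)]
    rw [PySem.Int.mod_eq_emod_of_pos hn]
    have hmod0 : 0 ≤ (0 + (j:Int) - s) % (xs.length:Int) := Int.emod_nonneg _ (by omega)
    have hmod1 : (0 + (j:Int) - s) % (xs.length:Int) < (xs.length:Int) := Int.emod_lt_of_pos _ hn
    rw [PySem.List.pyGetD_eq_getElem xs d hmod0 hmod1]
    rcases Nat.lt_or_ge j s.toNat with hcase | hcase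
    · rw [List.getElem_append_left (by simp only [List.length_drop]; omega), List.getElem_drop]
      have hidx : ((0 + (j:Int) - s) % (xs.length:Int)).toNat = xs.length - s.toNat + j := by
        have hmv : (0 + (j:Int) - s) % (xs.length:Int) = (j:Int) - s + (xs.length:Int) := by
          have h2 : ((0 + (j:Int) - s) + (xs.length:Int) * 1) % (xs.length:Int)
              = (0 + (j:Int) - s) % (xs.length:Int) := Int.add_mul_emod_self_left _ _ _
          rw [← h2, mul_one, Int.emod_eq_of_lt (by omega) (by omega)]
          ring
        rw [hmv]; omega
      simp only [hidx]
    · rw [List.getElem_append_right (by simp only [List.length_drop]; omega), List.getElem_take]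
      have hidx : ((0 + (j:Int) - s) % (xs.length:Int)).toNat
          = j - (List.drop (xs.length - s.toNat) xs).length := by
        have hmv : (0 + (j:Int) - s) % (xs.length:Int) = (j:Int) - s := by
          rw [Int.emod_eq_of_lt (by omega) (by omega)]
          ring
        rw [hmv]; simp only [List.length_drop]; omega
      simp only [hidx]

theorem reindexing_spatial_shift_spec : Claim_equal_reindexing_spatial_shift := by
  intro grid axis shift _ hpre
  unfold Spec_reindexing_spatial_shift reindexing_spatial_shift reindexing_spatial_shift_alt
  by_cases hg : grid = [] ∨ grid.headD [] = []
  · rw [if_pos hg, if_pos hg]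
  · rw [if_neg hg, if_neg hg]
    rcases hpre with h | h | ⟨hax, hrect⟩
    · exact absurd (Or.inl h) hg
    · exact absurd (Or.inr h) hg
    have hg1 : grid ≠ [] := fun h => hg (Or.inl h)
    have hg2 : grid.headD [] ≠ [] := fun h => hg (Or.inr h)
    rcases hax with h0 | h1
    · -- axis = 0
      subst h0
      rw [if_pos rfl, if_pos rfl]
      have hn : 0 < (grid.length : Int) := by
        have := List.length_pos_of_ne_nil hg1; exact_mod_cast this
      have hs0 : 0 ≤ PySem.Int.mod shift (grid.length : Int) := PySem.Int.mod_nonneg shift hn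
      have hs1 : PySem.Int.mod shift (grid.length : Int) < (grid.length : Int) :=
        PySem.Int.mod_lt shift hn
      rw [rot_mod_eq grid [] _ hs0 hs1]
      by_cases hz : PySem.Int.mod shift (grid.length : Int) = 0
      · rw [if_neg (not_not_intro hz)]
        simp [hz]
      · rw [if_pos hz]
        rw [show -(PySem.Int.mod shift (grid.length : Int))
              = -(((PySem.Int.mod shift (grid.length : Int)).toNat : Nat) : Int) by omega]
        rw [PySem.List.slice_from_neg_natCast grid _ (by omega),
            PySem.List.slice_to_neg_natCast grid _ (by omega)]
    · -- axis = 1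
      subst h1
      have h10 : ¬((1:Int) = 0) := by norm_num
      rw [if_neg h10, if_neg h10, if_pos rfl, if_pos rfl]
      apply List.map_congr_left
      intro row hrow
      have hlen : row.length = (grid.headD []).length := hrect rfl row hrow
      have hc : ((grid.headD []).length : Int) = (row.length : Int) := by exact_mod_cast hlen.symm
      rw [hc]
      have hn : 0 < (row.length : Int) := by
        have : (grid.headD []).length ≠ 0 := fun h => hg2 (List.eq_nil_of_length_eq_zero h)
        omega
      have hs0 : 0 ≤ PySem.Int.mod shift (row.length : Int) := PySem.Int.mod_nonneg shift hn
      have hs1 : PySem.Int.mod shift (row.length : Int) < (row.length : Int) :=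
        PySem.Int.mod_lt shift hn
      rw [rot_mod_eq row 0 _ hs0 hs1]
      by_cases hz : PySem.Int.mod shift (row.length : Int) = 0
      · rw [if_neg (not_not_intro hz)]
        simp [hz]
      · rw [if_pos hz]
        rw [show -(PySem.Int.mod shift (row.length : Int))
              = -(((PySem.Int.mod shift (row.length : Int)).toNat : Nat) : Int) by omega]
        rw [PySem.List.slice_from_neg_natCast row _ (by omega),
            PySem.List.slice_to_neg_natCast row _ (by omega)]
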